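-- pv_equiv track=rewrite | github.com/codemaker66/trades-hall-omni-twin | apps/ml-api/src/tda/simplicial.py | _compute_betti_numbers
-- ===== SOURCE A (Python) =====
-- def _compute_betti_numbers(simplices_by_dim: dict[int, list[tuple]]) -> dict:
--     """
--     Compute Betti numbers from simplicial complex via boundary matrices.
--
--     β_k = dim(ker(∂_k)) - dim(im(∂_{k+1}))
--     """
--     max_dim = max(simplices_by_dim.keys()) if simplices_by_dim else 0
--     betti: dict[str, int] = {}
--
--     for k in range(max_dim + 1):
--         key = f"beta_{k}"
--
--         k_simplices = simplices_by_dim.get(k, [])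
--         if not k_simplices:
--             betti[key] = 0
--             continue
--
--         # For β₀: count connected components
--         if k == 0:
--             # Use union-find on 1-simplices
--             vertices = {s[0] for s in k_simplices}
--             edges = simplices_by_dim.get(1, [])
--             parent: dict[str, str] = {v: v for v in vertices}
--
--             def find(x: str) -> str:
--                 while parent[x] != x:
--                     parent[x] = parent[parent[x]]
--                     x = parent[x]
--                 return x
--
--             def union(a: str, b: str) -> None:
--                 ra, rb = find(a), find(b)
--                 if ra != rb:
--                     parent[ra] = rb
--
--             for edge in edges:
--                 if len(edge) == 2:
--                     union(edge[0], edge[1])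
--
--             components = len(set(find(v) for v in vertices))
--             betti[key] = components
--         else:
--             # For higher Betti numbers, use rank formula
--             # This is a simplified estimate; exact computation requires
--             # Smith normal form of boundary matrices
--             n_k = len(k_simplices)
--             n_k_plus_1 = len(simplices_by_dim.get(k + 1, []))
--             n_k_minus_1 = len(simplices_by_dim.get(k - 1, []))
--
--             # Euler characteristic bound: rough estimate
--             betti[key] = max(0, n_k - n_k_minus_1 - n_k_plus_1)
--
--     return betti
-- ===== SOURCE B (Python) =====
-- def _compute_betti_numbers(simplices_by_dim: dict[int, list[tuple]]) -> dict:
--     """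
--     Compute Betti numbers from simplicial complex via boundary matrices.
--
--     beta_k = dim(ker(d_k)) - dim(im(d_{k+1}))
--     """
--     max_dim = max(simplices_by_dim.keys()) if simplices_by_dim else 0
--     betti: dict[str, int] = {}
--
--     for k in range(max_dim + 1):
--         key = f"beta_{k}"
--
--         k_simplices = simplices_by_dim.get(k, [])
--         if not k_simplices:
--             betti[key] = 0
--             continue
--
--         if k == 0:
--             # Count connected components by label propagation: every vertex
--             # starts in its own class; each edge merges the two classes by
--             # rewriting one label to the other.
--             vertices = {s[0] for s in k_simplices}
--             label: dict[str, str] = {v: v for v in vertices}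
--             for edge in simplices_by_dim.get(1, []):
--                 if len(edge) == 2:
--                     lu, lv = label[edge[0]], label[edge[1]]
--                     if lu != lv:
--                         for w in label:
--                             if label[w] == lv:
--                                 label[w] = lu
--             betti[key] = len(set(label.values()))
--         else:
--             # For higher Betti numbers, use rank formula (rough estimate).
--             n_k = len(k_simplices)
--             n_k_plus_1 = len(simplices_by_dim.get(k + 1, []))
--             n_k_minus_1 = len(simplices_by_dim.get(k - 1, []))
--             betti[key] = max(0, n_k - n_k_minus_1 - n_k_plus_1)
--
--     return betti
-- ===== Notes on version B (the rewrite author's own statement) =====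
-- stated objective: alternative
-- what changed: The k=0 connected-component count is computed by label propagation (every vertex starts as its own class label; each length-2 edge merges two classes by rewriting one label over the vertex table; the count is the number of distinct labels) instead of union-find with path halving; the outer dimension loop and the higher-dimension rank arithmetic are unchanged.
import Mathlib
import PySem

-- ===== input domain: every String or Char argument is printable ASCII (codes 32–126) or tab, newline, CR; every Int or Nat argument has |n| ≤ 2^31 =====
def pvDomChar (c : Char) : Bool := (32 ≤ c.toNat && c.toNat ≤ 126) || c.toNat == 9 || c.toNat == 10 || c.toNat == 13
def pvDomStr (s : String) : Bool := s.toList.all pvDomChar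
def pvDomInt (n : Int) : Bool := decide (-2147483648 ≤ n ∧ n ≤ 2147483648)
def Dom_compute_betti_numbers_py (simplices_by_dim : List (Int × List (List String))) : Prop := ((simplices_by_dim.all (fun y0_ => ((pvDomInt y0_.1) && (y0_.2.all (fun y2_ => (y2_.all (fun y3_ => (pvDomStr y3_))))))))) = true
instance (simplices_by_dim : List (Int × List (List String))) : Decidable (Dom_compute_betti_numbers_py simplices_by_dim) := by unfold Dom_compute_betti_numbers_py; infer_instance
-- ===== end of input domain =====

-- B replaces A's union-find component count (k = 0) by label propagation (merge classes by
-- rewriting labels); objective: alternative algorithm, same β_k values, same KeyError/IndexError domain.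

-- shared helpers (the Python dict argument, max key, s[0])
def pvDictOf (l : List (Int × List (List String))) : PySem.Dict Int (List (List String)) :=
  l.foldl (fun d kv => d.insert kv.1 kv.2) PySem.Dict.empty

def pvMaxDim (l : List (Int × List (List String))) : Int :=
  match PySem.List.max? (pvDictOf l).keys (fun x => x) with
  | some m => m
  | none => 0

def pvHead (s : List String) : String := (PySem.List.pyGet? s 0).getD ""

-- ===== PORT A =====
-- find with path halving; fuel only makes the Python 'while' total (unused fuel under Pre_)
def pvFind (d : PySem.Dict String String) (x : String) : Nat → PySem.Dict String String × String
  | 0 => (d, x)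
  | Nat.succ n =>
    let px := d.getD x x
    if px ≠ x then
      let gpx := d.getD px px
      pvFind (d.insert x gpx) gpx n
    else (d, x)

def pvUnion (d : PySem.Dict String String) (a b : String) (f : Nat) : PySem.Dict String String :=
  let fa := pvFind d a f
  let fb := pvFind fa.1 b f
  if fa.2 ≠ fb.2 then fb.1.insert fa.2 fb.2 else fb.1

def pvStepA (d : PySem.Dict Int (List (List String))) (betti : PySem.Dict String Int) (k : Int) :
    PySem.Dict String Int :=
  let key := "beta_" ++ PySem.Int.toStr k
  let ks := d.getD k []
  if ks = [] then betti.insert key 0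
  else if k = 0 then
    let V : PySem.Set String := PySem.Set.ofList (ks.map pvHead)
    let fuel := V.length + 1
    let parent0 : PySem.Dict String String := V.foldl (fun p v => p.insert v v) PySem.Dict.empty
    let parent1 := (d.getD 1 []).foldl (fun p e =>
      if e.length = 2 then pvUnion p (pvHead e) ((PySem.List.pyGet? e 1).getD "") fuel else p) parent0
    let res := V.foldl (fun (acc : PySem.Dict String String × List String) v =>
      let fr := pvFind acc.1 v fuel
      (fr.1, acc.2 ++ [fr.2])) (parent1, ([] : List String))
    betti.insert key ((PySem.Set.ofList res.2).length : Int)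
  else
    betti.insert key (max 0 ((ks.length : Int) - (d.getD (k-1) []).length - (d.getD (k+1) []).length))

def compute_betti_numbers_py (simplices_by_dim : List (Int × List (List String))) : List (String × Int) :=
  ((PySem.List.pyRange 0 (pvMaxDim simplices_by_dim + 1) 1).foldl
    (pvStepA (pvDictOf simplices_by_dim)) PySem.Dict.empty).items

-- ===== PORT B =====
-- 'for w in label: if label[w] == lv: label[w] = lu'
def pvRelabel (ws : List String) (lv lu : String) (lab : PySem.Dict String String) :
    PySem.Dict String String :=
  ws.foldl (fun l2 w => if l2.getD w w = lv then l2.insert w lu else l2) lab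

def pvStepB (d : PySem.Dict Int (List (List String))) (betti : PySem.Dict String Int) (k : Int) :
    PySem.Dict String Int :=
  let key := "beta_" ++ PySem.Int.toStr k
  let ks := d.getD k []
  if ks = [] then betti.insert key 0
  else if k = 0 then
    let V : PySem.Set String := PySem.Set.ofList (ks.map pvHead)
    let lab0 : PySem.Dict String String := V.foldl (fun p v => p.insert v v) PySem.Dict.empty
    let lab1 := (d.getD 1 []).foldl (fun lab e =>
      if e.length = 2 then
        let lu := lab.getD (pvHead e) (pvHead e)
        let lv := lab.getD ((PySem.List.pyGet? e 1).getD "") ((PySem.List.pyGet? e 1).getD "")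
        if lu ≠ lv then pvRelabel lab.keys lv lu lab else lab
      else lab) lab0
    betti.insert key ((PySem.Set.ofList lab1.values).length : Int)
  else
    betti.insert key (max 0 ((ks.length : Int) - (d.getD (k-1) []).length - (d.getD (k+1) []).length))

def compute_betti_numbers_py_alt (simplices_by_dim : List (Int × List (List String))) : List (String × Int) :=
  ((PySem.List.pyRange 0 (pvMaxDim simplices_by_dim + 1) 1).foldl
    (pvStepB (pvDictOf simplices_by_dim)) PySem.Dict.empty).items

-- ===== PRECONDITION & SPEC =====
-- Pre_ excludes exactly the inputs where Python A raises: an empty 0-simplex (IndexError on s[0])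
-- or a length-2 1-simplex naming a vertex outside the 0-simplices (KeyError in find), reached
-- only when the k = 0 branch runs on a nonempty vertex list.
def Pre_compute_betti_numbers_py (simplices_by_dim : List (Int × List (List String))) : Prop :=
  (0 ≤ pvMaxDim simplices_by_dim ∧ (pvDictOf simplices_by_dim).getD 0 [] ≠ []) →
    ((∀ s ∈ (pvDictOf simplices_by_dim).getD 0 [], s ≠ []) ∧
     (∀ e ∈ (pvDictOf simplices_by_dim).getD 1 [], e.length = 2 →
        ∀ x ∈ e, x ∈ ((pvDictOf simplices_by_dim).getD 0 []).map pvHead))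

instance (simplices_by_dim : List (Int × List (List String))) :
    Decidable (Pre_compute_betti_numbers_py simplices_by_dim) := by
  unfold Pre_compute_betti_numbers_py; infer_instance

def pvWitness_compute_betti_numbers_py : (List (Int × List (List String))) :=
  [(0, [["a"], ["b"], ["c"]]), (1, [["a", "b"]])]

def Spec_compute_betti_numbers_py (simplices_by_dim : List (Int × List (List String))) (out : List (String × Int)) : Prop := out = compute_betti_numbers_py_alt simplices_by_dim
instance (simplices_by_dim : List (Int × List (List String))) (out : List (String × Int)) : Decidable (Spec_compute_betti_numbers_py simplices_by_dim out) := by unfold Spec_compute_betti_numbers_py; infer_instance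

-- ===== CLAIM (what is proved, stated in full; the proofs are below) =====
def Claim_equal_compute_betti_numbers_py : Prop := ∀ (simplices_by_dim : List (Int × List (List String))), Dom_compute_betti_numbers_py simplices_by_dim → Pre_compute_betti_numbers_py simplices_by_dim → Spec_compute_betti_numbers_py simplices_by_dim (compute_betti_numbers_py simplices_by_dim)

-- ===== LEMMAS AND PROOFS =====

-- the parent/label dict as a total function (default: 'v' itself, never consulted on the verified inputs)
def pvf (d : PySem.Dict String String) (v : String) : String := d.getD v v

-- 'r is the root of v in the parent forest p'
def pvRootOf (p : String → String) (v r : String) : Prop := ∃ k, p^[k] v = r ∧ p r = r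

noncomputable def pvRoot (p : String → String) (v : String) : String :=
  @dite _ (∃ r, pvRootOf p v r) (Classical.dec _) (fun h => h.choose) (fun _ => v)

def pvInv (V : List String) (p : String → String) : Prop :=
  (∀ v ∈ V, p v ∈ V) ∧ (∀ v ∈ V, ∃ r, pvRootOf p v r)

def pvSameBlocks (V : List String) (p g : String → String) : Prop :=
  ∀ u ∈ V, ∀ w ∈ V, (pvRoot p u = pvRoot p w ↔ g u = g w)

lemma pvRootOf_unique {p : String → String} {v r s : String}
    (h1 : pvRootOf p v r) (h2 : pvRootOf p v s) : r = s := by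
  obtain ⟨k, hk, hr⟩ := h1
  obtain ⟨j, hj, hs⟩ := h2
  rcases le_total k j with h | h
  · have e1 : j - k + k = j := Nat.sub_add_cancel h
    have hx : p^[j] v = r := by
      rw [← e1, Function.iterate_add_apply, hk, Function.iterate_fixed hr]
    rw [hj] at hx; exact hx.symm
  · have e1 : k - j + j = k := Nat.sub_add_cancel h
    have hx : p^[k] v = s := by
      rw [← e1, Function.iterate_add_apply, hj, Function.iterate_fixed hs]
    rw [hk] at hx; exact hx

lemma pvRoot_eq {p : String → String} {v r : String} (h : pvRootOf p v r) : pvRoot p v = r := by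
  have hE : ∃ s, pvRootOf p v s := ⟨r, h⟩
  unfold pvRoot
  rw [dif_pos hE]
  exact pvRootOf_unique hE.choose_spec h

lemma pvRootOf_shift {p : String → String} {v r : String} (h : pvRootOf p (p v) r) :
    pvRootOf p v r :=
  ⟨h.choose + 1, by rw [Function.iterate_succ_apply]; exact h.choose_spec.1, h.choose_spec.2⟩

lemma pvf_insert (d : PySem.Dict String String) (a b : String) :
    pvf (d.insert a b) = Function.update (pvf d) a b := by
  funext v
  simp [pvf, PySem.Dict.getD_insert, Function.update_apply]

-- path halving keeps every root, with a witness no longer than before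
lemma pvRoot_halve {p : String → String} (x : String) {r : String} (hr : p r = r) :
    ∀ k v, p^[k] v = r →
      ∃ k' ≤ k, (Function.update p x (p (p x)))^[k'] v = r ∧
        Function.update p x (p (p x)) r = r := by
  have hqr : Function.update p x (p (p x)) r = r := by
    by_cases hxr : r = x
    · subst hxr; simp [hr]
    · simp [hxr, hr]
  intro k
  induction k using Nat.strong_induction_on with
  | _ k IH =>
    intro v hk
    match k, hk with
    | 0, hk => exact ⟨0, Nat.le_refl 0, by simpa using hk, hqr⟩
    | (n+1), hk =>
      by_cases hvx : v = x
      · have hqv : Function.update p x (p (p x)) v = p (p x) := by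
          simp [Function.update_apply, hvx]
        rw [hvx] at hk
        match n, hk with
        | 0, hk =>
          have hpx : p x = r := by simpa using hk
          have hfix : Function.update p x (p (p x)) v = r := by rw [hqv, hpx, hr]
          exact ⟨1, by omega, by simpa using hfix, hqr⟩
        | (m+1), hk =>
          have hk' : p^[m] (p (p x)) = r := by
            have h2 := hk
            rw [Function.iterate_succ_apply, Function.iterate_succ_apply] at h2
            exact h2
          obtain ⟨k', hle, heq, _⟩ := IH m (by omega) (p (p x)) hk'
          exact ⟨k' + 1, by omega, by rw [Function.iterate_succ_apply, hqv]; exact heq, hqr⟩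
      · have hqv : Function.update p x (p (p x)) v = p v := by
          simp [hvx]
        have hk' : p^[n] (p v) = r := by rw [← Function.iterate_succ_apply]; exact hk
        obtain ⟨k', hle, heq, _⟩ := IH n (by omega) (p v) hk'
        exact ⟨k' + 1, by omega, by rw [Function.iterate_succ_apply, hqv]; exact heq, hqr⟩

lemma pvRootOf_halve {p : String → String} (x : String) {v r : String} (h : pvRootOf p v r) :
    pvRootOf (Function.update p x (p (p x))) v r := by
  obtain ⟨k, hk, hr⟩ := h
  obtain ⟨k', _, heq, hfix⟩ := pvRoot_halve x hr k v hk
  exact ⟨k', heq, hfix⟩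

-- linking two roots rewrites every root ra to rb
lemma pvRoot_union {p : String → String} {ra rb : String} (hra : p ra = ra) (hrb : p rb = rb)
    (hne : ra ≠ rb) :
    ∀ (k : Nat) (v r : String), p^[k] v = r → p r = r →
      pvRootOf (Function.update p ra rb) v (if r = ra then rb else r) := by
  have hqrb : Function.update p ra rb rb = rb := by
    simp [(Ne.symm hne), hrb]
  intro k
  induction k with
  | zero =>
    intro v r hk hr
    simp only [Function.iterate_zero, id] at hk
    subst hk
    by_cases hvra : v = ra
    · rw [if_pos hvra]
      exact ⟨1, by simp [hvra], hqrb⟩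
    · rw [if_neg hvra]
      exact ⟨0, rfl, by simp [hvra, hr]⟩
  | succ n IH =>
    intro v r hk hr
    by_cases hvra : v = ra
    · have hfix : p^[n+1] v = v := by
        rw [hvra]; exact (hvra ▸ Function.iterate_fixed hra (n+1))
      rw [hk] at hfix
      rw [if_pos (by rw [hfix]; exact hvra)]
      exact ⟨1, by simp [hvra], hqrb⟩
    · have hk' : p^[n] (p v) = r := by rw [← Function.iterate_succ_apply]; exact hk
      have hres := IH (p v) r hk' hr
      have hqv : Function.update p ra rb v = p v := by simp [hvra]
      exact pvRootOf_shift (by rwa [hqv])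

lemma pvIter_mem {V : List String} {p : String → String} (hC : ∀ v ∈ V, p v ∈ V)
    {v : String} (hv : v ∈ V) : ∀ k, p^[k] v ∈ V := by
  intro k
  induction k with
  | zero => simpa
  | succ n ih => rw [Function.iterate_succ_apply']; exact hC _ ih

-- pigeonhole: some witness is shorter than |V|
lemma pvWitness_lt {V : List String} {p : String → String} (hC : ∀ v ∈ V, p v ∈ V)
    {v r : String} (hv : v ∈ V) (h : pvRootOf p v r) :
    ∃ k, k < V.length ∧ p^[k] v = r := by
  obtain ⟨k0, hk0, hrfix⟩ := h
  have hE : ∃ n, p^[n] v = r := ⟨k0, hk0⟩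
  have hks : p^[Nat.find hE] v = r := Nat.find_spec hE
  by_cases hlt : Nat.find hE < V.length
  · exact ⟨Nat.find hE, hlt, hks⟩
  · exfalso
    rw [Nat.not_lt] at hlt
    have key : ∀ i j : Nat, i < j → j ≤ Nat.find hE → p^[i] v = p^[j] v → False := by
      intro i j hij hjk heq
      have h1 : p^[Nat.find hE] v = p^[Nat.find hE - j] (p^[j] v) := by
        rw [← Function.iterate_add_apply, Nat.sub_add_cancel hjk]
      rw [← heq, ← Function.iterate_add_apply] at h1
      have h2 : p^[Nat.find hE - j + i] v = r := by rw [← h1]; exact hks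
      exact Nat.find_min hE (by omega) h2
    have hmaps : ∀ i ∈ Finset.range (Nat.find hE + 1), p^[i] v ∈ V.toFinset :=
      fun i _ => List.mem_toFinset.2 (pvIter_mem hC hv i)
    have hcard : V.toFinset.card < (Finset.range (Nat.find hE + 1)).card := by
      rw [Finset.card_range]
      have := V.toFinset_card_le
      omega
    obtain ⟨i, hi, j, hj, hij, heq⟩ :=
      Finset.exists_ne_map_eq_of_card_lt_of_maps_to hcard hmaps
    simp only [Finset.mem_range] at hi hj
    rcases Nat.lt_or_ge i j with hlt2 | hge
    · exact key i j hlt2 (by omega) heq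
    · exact key j i (by omega) (by omega) heq.symm

lemma pvFind_spec {V : List String} :
    ∀ (f k : Nat) (d : PySem.Dict String String) (x r : String),
      (∀ v ∈ V, pvf d v ∈ V) → x ∈ V → (pvf d)^[k] x = r → pvf d r = r → k < f →
      (pvFind d x f).2 = r ∧ (∀ v ∈ V, pvf (pvFind d x f).1 v ∈ V) ∧
        (∀ v s, pvRootOf (pvf d) v s → pvRootOf (pvf (pvFind d x f).1) v s) := by
  intro f
  induction f with
  | zero => intro k d x r _ _ _ _ hkf; omega
  | succ n IH =>
    intro k d x r hC hx hk hr hkf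
    by_cases hpx : d.getD x x = x
    · have hpx' : pvf d x = x := hpx
      have hfind : pvFind d x (n+1) = (d, x) := by
        simp [pvFind, hpx]
      have hxr : x = r := by
        have h2 : (pvf d)^[k] x = x := Function.iterate_fixed hpx' k
        rw [hk] at h2; exact h2.symm
      rw [hfind]
      exact ⟨hxr, hC, fun v s hs => hs⟩
    · have hgpx : d.getD (d.getD x x) (d.getD x x) = pvf d (pvf d x) := rfl
      have hfind : pvFind d x (n+1) =
          pvFind (d.insert x (pvf d (pvf d x))) (pvf d (pvf d x)) n := by
        simp only [pvFind]
        rw [if_pos hpx]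
        rfl
      have hq : pvf (d.insert x (pvf d (pvf d x))) =
          Function.update (pvf d) x (pvf d (pvf d x)) := pvf_insert d x _
      have hrx : r ≠ x := by
        intro hcontra; subst hcontra; exact hpx hr
      have hCq : ∀ v ∈ V, pvf (d.insert x (pvf d (pvf d x))) v ∈ V := by
        intro v hvV
        rw [hq, Function.update_apply]
        split
        · exact hC _ (hC _ hx)
        · exact hC _ hvV
      have hx' : pvf d (pvf d x) ∈ V := hC _ (hC _ hx)
      have hqfix : pvf (d.insert x (pvf d (pvf d x))) r = r := by
        rw [hq, Function.update_apply, if_neg hrx]; exact hr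
      have htrans : ∀ v s, pvRootOf (pvf d) v s →
          pvRootOf (pvf (d.insert x (pvf d (pvf d x)))) v s := by
        intro v s hs; rw [hq]; exact pvRootOf_halve x hs
      -- get a short witness for the new start point
      match k, hk, hkf with
      | 0, hk, hkf =>
        exfalso
        simp only [Function.iterate_zero, id] at hk
        apply hpx
        show pvf d x = x
        rw [hk]; exact hr
      | 1, hk, hkf =>
        have hpxr : pvf d x = r := by simpa using hk
        have hx'r : pvf d (pvf d x) = r := by rw [hpxr]; exact hr
        have hn1 : 0 < n := by omega
        obtain ⟨hv2, hv3, hv4⟩ := IH 0 (d.insert x (pvf d (pvf d x))) (pvf d (pvf d x)) r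
          hCq hx' (by simpa using hx'r) hqfix hn1
        rw [hfind]
        exact ⟨hv2, hv3, fun v s hs => hv4 v s (htrans v s hs)⟩
      | (k2+2), hk, hkf =>
        have hk' : (pvf d)^[k2] (pvf d (pvf d x)) = r := by
          have h2 := hk
          rw [Function.iterate_succ_apply, Function.iterate_succ_apply] at h2
          exact h2
        obtain ⟨k', hle, heq, _⟩ := pvRoot_halve x hr k2 _ hk'
        rw [← hq] at heq
        obtain ⟨hv2, hv3, hv4⟩ := IH k' (d.insert x (pvf d (pvf d x))) (pvf d (pvf d x)) r
          hCq hx' heq hqfix (by omega)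
        rw [hfind]
        exact ⟨hv2, hv3, fun v s hs => hv4 v s (htrans v s hs)⟩

lemma pvFind_root {V : List String} (_hnd : V.Nodup) {f : Nat} (hf : V.length < f)
    {d : PySem.Dict String String} {x : String} (hx : x ∈ V) (hI : pvInv V (pvf d)) :
    (pvFind d x f).2 = pvRoot (pvf d) x ∧ pvInv V (pvf (pvFind d x f).1) ∧
      (∀ v ∈ V, pvRoot (pvf (pvFind d x f).1) v = pvRoot (pvf d) v) := by
  obtain ⟨r, hroot⟩ := hI.2 x hx
  obtain ⟨k, hklt, hkeq⟩ := pvWitness_lt hI.1 hx hroot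
  have hfixr : pvf d r = r := hroot.choose_spec.2
  obtain ⟨hv2, hv3, hv4⟩ := pvFind_spec f k d x r hI.1 hx hkeq hfixr (by omega)
  refine ⟨by rw [hv2, pvRoot_eq hroot], ⟨hv3, ?_⟩, ?_⟩
  · intro v hvV
    obtain ⟨s, hs⟩ := hI.2 v hvV
    exact ⟨s, hv4 v s hs⟩
  · intro v hvV
    obtain ⟨s, hs⟩ := hI.2 v hvV
    rw [pvRoot_eq hs, pvRoot_eq (hv4 v s hs)]

lemma pvRootOf_self_root {p : String → String} {v r : String} (h : pvRootOf p v r) :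
    pvRootOf p r r := ⟨0, rfl, h.choose_spec.2⟩

lemma pvUnion_spec {V : List String} (hnd : V.Nodup) {f : Nat} (hf : V.length < f)
    {d : PySem.Dict String String} {a b : String} (ha : a ∈ V) (hb : b ∈ V)
    (hI : pvInv V (pvf d)) :
    pvInv V (pvf (pvUnion d a b f)) ∧
      (∀ v ∈ V, pvRoot (pvf (pvUnion d a b f)) v =
        (if pvRoot (pvf d) v = pvRoot (pvf d) a then pvRoot (pvf d) b else pvRoot (pvf d) v)) := by
  obtain ⟨ha2, hIa, hra_eq⟩ := pvFind_root hnd hf ha hI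
  obtain ⟨hb2, hIb, hrb_eq⟩ := pvFind_root hnd hf hb hIa
  obtain ⟨ra0, hraroot⟩ := hI.2 a ha
  have hra3 : pvRoot (pvf d) a = ra0 := pvRoot_eq hraroot
  have hraV : ra0 ∈ V := by
    obtain ⟨k, hk, _⟩ := hraroot
    rw [← hk]; exact pvIter_mem hI.1 ha k
  obtain ⟨rb0, hbroot⟩ := hI.2 b hb
  have hrb3 : pvRoot (pvf d) b = rb0 := pvRoot_eq hbroot
  have hrbV : rb0 ∈ V := by
    obtain ⟨k, hk, _⟩ := hbroot
    rw [← hk]; exact pvIter_mem hI.1 hb k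
  -- names for the two intermediate dicts
  have hfa2 : (pvFind d a f).2 = ra0 := by rw [ha2, hra3]
  have hfb2 : (pvFind (pvFind d a f).1 b f).2 = rb0 := by
    rw [hb2, hra_eq b hb, hrb3]
  -- the roots of the dict after both finds agree with those of d on V
  have hroots2 : ∀ v ∈ V, pvRoot (pvf (pvFind (pvFind d a f).1 b f).1) v = pvRoot (pvf d) v := by
    intro v hvV
    rw [hrb_eq v hvV, hra_eq v hvV]
  have hfix2 : ∀ s ∈ V, pvRootOf (pvf d) s s →
      pvf (pvFind (pvFind d a f).1 b f).1 s = s := by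
    intro s hsV hs
    obtain ⟨t, ht⟩ := hIb.2 s hsV
    have h1 : pvRoot (pvf (pvFind (pvFind d a f).1 b f).1) s = t := pvRoot_eq ht
    rw [hroots2 s hsV, pvRoot_eq hs] at h1
    rw [← h1] at ht
    exact ht.choose_spec.2
  have hfixra : pvf (pvFind (pvFind d a f).1 b f).1 ra0 = ra0 :=
    hfix2 ra0 hraV (pvRootOf_self_root hraroot)
  have hfixrb : pvf (pvFind (pvFind d a f).1 b f).1 rb0 = rb0 :=
    hfix2 rb0 hrbV (pvRootOf_self_root hbroot)
  by_cases hne : (pvFind d a f).2 ≠ (pvFind (pvFind d a f).1 b f).2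
  · have hne0 : ra0 ≠ rb0 := by rw [hfa2, hfb2] at hne; exact hne
    have hun : pvUnion d a b f =
        ((pvFind (pvFind d a f).1 b f).1).insert (pvFind d a f).2 (pvFind (pvFind d a f).1 b f).2 := by
      simp only [pvUnion]
      rw [if_pos hne]
    rw [hun, hfa2, hfb2, pvf_insert]
    constructor
    · constructor
      · intro v hvV
        rw [Function.update_apply]
        split
        · exact hrbV
        · exact hIb.1 v hvV
      · intro v hvV
        obtain ⟨s, hs⟩ := hIb.2 v hvV
        obtain ⟨k, hk, hsf⟩ := hs
        exact ⟨_, pvRoot_union hfixra hfixrb hne0 k v s hk hsf⟩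
    · intro v hvV
      obtain ⟨s, hs⟩ := hIb.2 v hvV
      obtain ⟨k, hk, hsf⟩ := hs
      have hnew := pvRoot_union hfixra hfixrb hne0 k v s hk hsf
      rw [pvRoot_eq hnew]
      have hsold : pvRoot (pvf d) v = s := by
        rw [← hroots2 v hvV]; exact pvRoot_eq ⟨k, hk, hsf⟩
      rw [hsold, hra3, hrb3]
  · rw [not_ne_iff] at hne
    have heq0 : ra0 = rb0 := by rw [hfa2, hfb2] at hne; exact hne
    have hun : pvUnion d a b f = (pvFind (pvFind d a f).1 b f).1 := by
      simp only [pvUnion]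
      rw [if_neg (by simpa using hne)]
    rw [hun]
    refine ⟨hIb, ?_⟩
    intro v hvV
    rw [hroots2 v hvV, hra3, hrb3]
    split
    · rename_i hcond
      rw [hcond, heq0]
    · rfl

lemma pvf_init_aux (V : List String) :
    ∀ (d : PySem.Dict String String), (∀ v, pvf d v = v) →
      ∀ v, pvf (V.foldl (fun p v => p.insert v v) d) v = v := by
  induction V with
  | nil => intro d hd v; exact hd v
  | cons w V ih =>
    intro d hd v
    simp only [List.foldl_cons]
    apply ih
    intro u
    rw [pvf_insert, Function.update_apply]
    split
    · rename_i h; exact h.symm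
    · exact hd u

lemma pvf_init (V : List String) :
    pvf (V.foldl (fun p v => p.insert v v) PySem.Dict.empty) = fun v => v := by
  funext v
  apply pvf_init_aux
  intro u
  simp [pvf, PySem.Dict.getD_empty]

lemma pvKeys_init (V : List String) (hnd : V.Nodup) :
    (V.foldl (fun p v => p.insert v v) PySem.Dict.empty).keys = V := by
  rw [PySem.Dict.keys_foldl_insert, PySem.Dict.keys_empty, PySem.Set.update_nil_left]
  exact PySem.Set.ofList_eq_self_of_nodup V hnd

lemma pvGetD_keys {d : PySem.Dict String String} {k : String} (hk : k ∈ d.keys) (dflt : String) :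
    d.getD k dflt = pvf d k := by
  cases hg : d.get? k with
  | none =>
    rw [PySem.Dict.get?_eq_none_iff_not_mem_keys] at hg
    exact absurd hk hg
  | some w =>
    unfold pvf
    rw [PySem.Dict.getD_eq_get?_getD, PySem.Dict.getD_eq_get?_getD, hg]
    rfl

lemma pvRelabel_pvf (lv lu : String) :
    ∀ (ws : List String) (lab : PySem.Dict String String), ws.Nodup →
      ∀ v, pvf (pvRelabel ws lv lu lab) v =
        (if v ∈ ws ∧ pvf lab v = lv then lu else pvf lab v) := by
  intro ws
  induction ws with
  | nil => intro lab _ v; simp [pvRelabel]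
  | cons w ws ih =>
    intro lab hnd v
    have hndtail : ws.Nodup := (List.nodup_cons.1 hnd).2
    have hwnot : w ∉ ws := (List.nodup_cons.1 hnd).1
    have hstep : pvRelabel (w :: ws) lv lu lab =
        pvRelabel ws lv lu (if lab.getD w w = lv then lab.insert w lu else lab) := by
      simp only [pvRelabel, List.foldl_cons]
    rw [hstep, ih _ hndtail]
    have hlab1 : ∀ u, pvf (if lab.getD w w = lv then lab.insert w lu else lab) u =
        (if u = w ∧ pvf lab u = lv then lu else pvf lab u) := by
      intro u
      by_cases hcond : lab.getD w w = lv
      · rw [if_pos hcond, pvf_insert, Function.update_apply]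
        by_cases huw : u = w
        · rw [if_pos huw, if_pos ⟨huw, by rw [huw]; exact hcond⟩]
        · rw [if_neg huw, if_neg (fun hc => huw hc.1)]
      · rw [if_neg hcond]
        by_cases huw : u = w
        · rw [if_neg (fun hc => hcond (by rw [← huw]; exact hc.2))]
        · rw [if_neg (fun hc => huw hc.1)]
    by_cases hvw : v = w
    · rw [if_neg (fun hc => hwnot (hvw ▸ hc.1)), hlab1 v]
      by_cases hcv : pvf lab v = lv
      · rw [if_pos ⟨hvw, hcv⟩, if_pos ⟨by simp [hvw], hcv⟩]
      · rw [if_neg (fun hc => hcv hc.2), if_neg (fun hc => hcv hc.2)]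
    · have heq : pvf (if lab.getD w w = lv then lab.insert w lu else lab) v = pvf lab v := by
        rw [hlab1 v]; exact if_neg (fun hc => hvw hc.1)
      rw [heq]
      by_cases hcv2 : v ∈ ws ∧ pvf lab v = lv
      · rw [if_pos hcv2, if_pos ⟨by simp [hcv2.1], hcv2.2⟩]
      · rw [if_neg hcv2, if_neg (fun hc => hcv2 ⟨by
          rcases List.mem_cons.1 hc.1 with h | h
          · exact absurd h hvw
          · exact h, hc.2⟩)]

lemma pvRelabel_keys (lv lu : String) :
    ∀ (ws : List String) (lab : PySem.Dict String String), (∀ w ∈ ws, lab.contains w) →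
      (pvRelabel ws lv lu lab).keys = lab.keys := by
  intro ws
  induction ws with
  | nil => intro lab _; simp [pvRelabel]
  | cons w ws ih =>
    intro lab hws
    have hstep : pvRelabel (w :: ws) lv lu lab =
        pvRelabel ws lv lu (if lab.getD w w = lv then lab.insert w lu else lab) := by
      simp only [pvRelabel, List.foldl_cons]
    rw [hstep]
    by_cases hcond : lab.getD w w = lv
    · rw [if_pos hcond, ih]
      · exact PySem.Dict.keys_insert_of_contains lab lu (hws w (by simp))
      · intro u hu
        rw [PySem.Dict.contains_insert]
        simp [hws u (by simp [hu])]
    · rw [if_neg hcond]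
      exact ih lab (fun u hu => hws u (by simp [hu]))

lemma pvMerge_iff {ra rb r0 r1 lu lv l0 l1 : String}
    (hab : ra ≠ rb) (hlv : lu ≠ lv)
    (h0a : r0 = ra ↔ l0 = lu) (h0b : r0 = rb ↔ l0 = lv)
    (h1a : r1 = ra ↔ l1 = lu) (h1b : r1 = rb ↔ l1 = lv)
    (h01 : r0 = r1 ↔ l0 = l1) :
    ((if r0 = ra then rb else r0) = (if r1 = ra then rb else r1)) ↔
    ((if l0 = lv then lu else l0) = (if l1 = lv then lu else l1)) := by
  by_cases c0 : r0 = ra <;> by_cases c1 : r1 = ra <;>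
    by_cases d0 : l0 = lv <;> by_cases d1 : l1 = lv <;>
      simp_all <;> tauto

lemma pvCount_aux :
    ∀ (V : List String) (f g : String → String),
      (∀ u ∈ V, ∀ w ∈ V, (f u = f w ↔ g u = g w)) →
      (V.map f).toFinset.card = (V.map g).toFinset.card := by
  intro V
  induction V with
  | nil => intro f g h; rfl
  | cons v V ih =>
    intro f g h
    simp only [List.map_cons, List.toFinset_cons]
    have hmem : f v ∈ (V.map f).toFinset ↔ g v ∈ (V.map g).toFinset := by
      simp only [List.mem_toFinset, List.mem_map]
      constructor
      · rintro ⟨w, hw, hfw⟩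
        exact ⟨w, hw, (h w (by simp [hw]) v (by simp)).1 hfw⟩
      · rintro ⟨w, hw, hgw⟩
        exact ⟨w, hw, (h w (by simp [hw]) v (by simp)).2 hgw⟩
    have ihe := ih f g (fun u hu w hw => h u (by simp [hu]) w (by simp [hw]))
    by_cases hm : f v ∈ (V.map f).toFinset
    · rw [Finset.insert_eq_self.2 hm, Finset.insert_eq_self.2 (hmem.1 hm), ihe]
    · rw [Finset.card_insert_of_notMem hm,
        Finset.card_insert_of_notMem (fun hc => hm (hmem.2 hc)), ihe]

lemma pvLen_ofList (xs : List String) : (PySem.Set.ofList xs).length = xs.toFinset.card := by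
  have hnd : (PySem.Set.ofList xs).Nodup := PySem.Set.nodup_ofList xs
  have he : (PySem.Set.ofList xs).toFinset = xs.toFinset := by
    ext a; simp [List.mem_toFinset, PySem.Set.mem_ofList]
  rw [← List.toFinset_card_of_nodup hnd, he]

lemma pvCount_congr (V : List String) (f g : String → String)
    (h : ∀ u ∈ V, ∀ w ∈ V, (f u = f w ↔ g u = g w)) :
    (PySem.Set.ofList (V.map f)).length = (PySem.Set.ofList (V.map g)).length := by
  rw [pvLen_ofList, pvLen_ofList]
  exact pvCount_aux V f g h

lemma pvEdges_inv {V : List String} (hnd : V.Nodup) :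
    ∀ (E : List (List String)) (d lab : PySem.Dict String String),
      (∀ e ∈ E, e.length = 2 → pvHead e ∈ V ∧ (PySem.List.pyGet? e 1).getD "" ∈ V) →
      pvInv V (pvf d) → lab.keys = V → pvSameBlocks V (pvf d) (pvf lab) →
      pvInv V (pvf (E.foldl (fun p e =>
          if e.length = 2 then pvUnion p (pvHead e) ((PySem.List.pyGet? e 1).getD "") (V.length + 1) else p) d)) ∧
      (E.foldl (fun lab e =>
          if e.length = 2 then
            let lu := lab.getD (pvHead e) (pvHead e)
            let lv := lab.getD ((PySem.List.pyGet? e 1).getD "") ((PySem.List.pyGet? e 1).getD "")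
            if lu ≠ lv then pvRelabel lab.keys lv lu lab else lab
          else lab) lab).keys = V ∧
      pvSameBlocks V
        (pvf (E.foldl (fun p e =>
          if e.length = 2 then pvUnion p (pvHead e) ((PySem.List.pyGet? e 1).getD "") (V.length + 1) else p) d))
        (pvf (E.foldl (fun lab e =>
          if e.length = 2 then
            let lu := lab.getD (pvHead e) (pvHead e)
            let lv := lab.getD ((PySem.List.pyGet? e 1).getD "") ((PySem.List.pyGet? e 1).getD "")
            if lu ≠ lv then pvRelabel lab.keys lv lu lab else lab
          else lab) lab)) := by
  intro E
  induction E with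
  | nil => intro d lab _ hI hkeys hSB; exact ⟨hI, hkeys, hSB⟩
  | cons e E ih =>
    intro d lab hE hI hkeys hSB
    simp only [List.foldl_cons]
    by_cases hlen : e.length = 2
    · obtain ⟨hu, hv⟩ := hE e (by simp) hlen
      rw [if_pos hlen, if_pos hlen]
      have hBstep : (let lu := lab.getD (pvHead e) (pvHead e)
          let lv := lab.getD ((PySem.List.pyGet? e 1).getD "") ((PySem.List.pyGet? e 1).getD "")
          if lu ≠ lv then pvRelabel lab.keys lv lu lab else lab) =
          (if pvf lab (pvHead e) ≠ pvf lab ((PySem.List.pyGet? e 1).getD "") then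
            pvRelabel lab.keys (pvf lab ((PySem.List.pyGet? e 1).getD "")) (pvf lab (pvHead e)) lab
          else lab) := rfl
      rw [hBstep]
      obtain ⟨hIA, hrootsA⟩ := pvUnion_spec hnd (Nat.lt_succ_self _) hu hv hI
      by_cases hlu : pvf lab (pvHead e) = pvf lab ((PySem.List.pyGet? e 1).getD "")
      · -- labels equal, hence roots equal: both sides merge nothing
        rw [if_neg (not_not_intro hlu)]
        have hr_eq : pvRoot (pvf d) (pvHead e) = pvRoot (pvf d) ((PySem.List.pyGet? e 1).getD "") :=
          (hSB _ hu _ hv).2 hlu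
        have hcollapse : ∀ v0 ∈ V,
            pvRoot (pvf (pvUnion d (pvHead e) ((PySem.List.pyGet? e 1).getD "") (V.length + 1))) v0 =
              pvRoot (pvf d) v0 := by
          intro v0 hv0
          rw [hrootsA v0 hv0]
          split_ifs with hc
          · rw [hc]; exact hr_eq.symm
          · rfl
        refine ih _ _ (fun e' he' h2 => hE e' (by simp [he']) h2) hIA hkeys ?_
        intro u0 hu0 w0 hw0
        rw [hcollapse u0 hu0, hcollapse w0 hw0]
        exact hSB u0 hu0 w0 hw0
      · -- labels differ, hence roots differ: merge on both sides
        rw [if_pos hlu]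
        have hcontains : ∀ w ∈ lab.keys, lab.contains w := by
          intro w hw
          exact (PySem.Dict.contains_iff_mem_keys lab w).2 hw
        have hkeys' : (pvRelabel lab.keys (pvf lab ((PySem.List.pyGet? e 1).getD ""))
            (pvf lab (pvHead e)) lab).keys = V := by
          rw [pvRelabel_keys _ _ lab.keys lab hcontains]; exact hkeys
        have hndk : lab.keys.Nodup := by rw [hkeys]; exact hnd
        have hlabf : ∀ v0 ∈ V,
            pvf (pvRelabel lab.keys (pvf lab ((PySem.List.pyGet? e 1).getD ""))
              (pvf lab (pvHead e)) lab) v0 =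
            (if pvf lab v0 = pvf lab ((PySem.List.pyGet? e 1).getD "") then pvf lab (pvHead e)
             else pvf lab v0) := by
          intro v0 hv0
          rw [pvRelabel_pvf _ _ lab.keys lab hndk v0]
          by_cases hc : pvf lab v0 = pvf lab ((PySem.List.pyGet? e 1).getD "")
          · rw [if_pos ⟨by rw [hkeys]; exact hv0, hc⟩, if_pos hc]
          · rw [if_neg (fun h2 => hc h2.2), if_neg hc]
        have hrne : pvRoot (pvf d) (pvHead e) ≠ pvRoot (pvf d) ((PySem.List.pyGet? e 1).getD "") :=
          fun hc => hlu ((hSB _ hu _ hv).1 hc)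
        refine ih _ _ (fun e' he' h2 => hE e' (by simp [he']) h2) hIA hkeys' ?_
        intro u0 hu0 w0 hw0
        rw [hrootsA u0 hu0, hrootsA w0 hw0, hlabf u0 hu0, hlabf w0 hw0]
        exact pvMerge_iff hrne hlu (hSB u0 hu0 _ hu) (hSB u0 hu0 _ hv)
          (hSB w0 hw0 _ hu) (hSB w0 hw0 _ hv) (hSB u0 hu0 w0 hw0)
    · rw [if_neg hlen, if_neg hlen]
      exact ih _ _ (fun e' he' h2 => hE e' (by simp [he']) h2) hI hkeys hSB

lemma pvCollect_roots {V : List String} (hnd : V.Nodup) :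
    ∀ (W : List String) (d : PySem.Dict String String) (acc : List String),
      (∀ w ∈ W, w ∈ V) → pvInv V (pvf d) →
      (W.foldl (fun (acc : PySem.Dict String String × List String) v =>
        let fr := pvFind acc.1 v (V.length + 1)
        (fr.1, acc.2 ++ [fr.2])) (d, acc)).2 = acc ++ W.map (pvRoot (pvf d)) := by
  intro W
  induction W with
  | nil => intro d acc _ _; simp
  | cons w W ih =>
    intro d acc hW hI
    obtain ⟨h2, hI1, hroots⟩ := pvFind_root hnd (Nat.lt_succ_self _) (hW w (by simp)) hI
    simp only [List.foldl_cons]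
    rw [ih _ _ (fun u hu => hW u (by simp [hu])) hI1]
    rw [h2]
    have : W.map (pvRoot (pvf (pvFind d w (V.length + 1)).1)) = W.map (pvRoot (pvf d)) := by
      apply List.map_congr_left
      intro u hu
      exact hroots u (hW u (by simp [hu]))
    rw [this]
    simp

lemma pvStep_eq (d : PySem.Dict Int (List (List String)))
    (hpre : d.getD 0 [] ≠ [] →
      (∀ e ∈ d.getD 1 [], e.length = 2 → ∀ x ∈ e, x ∈ (d.getD 0 []).map pvHead))
    (betti : PySem.Dict String Int) (k : Int) : pvStepA d betti k = pvStepB d betti k := by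
  by_cases hks : d.getD k [] = []
  · simp only [pvStepA, pvStepB, if_pos hks]
  · by_cases hk0 : k = 0
    · subst hk0
      simp only [pvStepA, pvStepB, if_neg hks]
      have hnd : (PySem.Set.ofList ((d.getD (0:Int) []).map pvHead)).Nodup :=
        PySem.Set.nodup_ofList _
      set V := PySem.Set.ofList ((d.getD (0:Int) []).map pvHead) with hV
      set p0 : PySem.Dict String String := V.foldl (fun p v => p.insert v v) PySem.Dict.empty
        with hp0
      set parentE := (d.getD (1:Int) []).foldl (fun p e =>
        if e.length = 2 then pvUnion p (pvHead e) ((PySem.List.pyGet? e 1).getD "") (V.length + 1)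
        else p) p0 with hPE
      set labE := (d.getD (1:Int) []).foldl (fun lab e =>
        if e.length = 2 then
          let lu := lab.getD (pvHead e) (pvHead e)
          let lv := lab.getD ((PySem.List.pyGet? e 1).getD "") ((PySem.List.pyGet? e 1).getD "")
          if lu ≠ lv then pvRelabel lab.keys lv lu lab else lab
        else lab) p0 with hLE
      have hE : ∀ e ∈ d.getD (1:Int) [], e.length = 2 →
          pvHead e ∈ V ∧ (PySem.List.pyGet? e 1).getD "" ∈ V := by
        intro e he hlen
        obtain ⟨a, b, rfl⟩ := List.length_eq_two.1 hlen
        have hmema := hpre hks [a, b] he hlen a (by simp)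
        have hmemb := hpre hks [a, b] he hlen b (by simp)
        rw [hV]
        constructor
        · exact (PySem.Set.mem_ofList _ _).2 (by simpa [pvHead] using hmema)
        · exact (PySem.Set.mem_ofList _ _).2 (by simpa [pvHead] using hmemb)
      have hpf0 : pvf p0 = fun v => v := by rw [hp0]; exact pvf_init V
      have hid : ∀ z, pvRoot (fun v : String => v) z = z := fun z => pvRoot_eq ⟨0, rfl, rfl⟩
      have hI0 : pvInv V (pvf p0) := by
        rw [hpf0]
        exact ⟨fun v hv => hv, fun v hv => ⟨v, 0, rfl, rfl⟩⟩
      have hkeys0 : p0.keys = V := by rw [hp0]; exact pvKeys_init V hnd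
      have hSB0 : pvSameBlocks V (pvf p0) (pvf p0) := by
        intro u hu w hw
        simp [hpf0, hid]
      obtain ⟨hIA, hkeysB, hSB⟩ := pvEdges_inv hnd (d.getD (1:Int) []) p0 p0 hE hI0 hkeys0 hSB0
      rw [← hPE] at hIA
      rw [← hLE] at hkeysB
      rw [← hPE, ← hLE] at hSB
      have hcollect := pvCollect_roots hnd V parentE [] (fun w hw => hw) hIA
      have hndk : labE.keys.Nodup := by rw [hkeysB]; exact hnd
      have hvals2 : labE.values = V.map (pvf labE) := by
        rw [PySem.Dict.values_eq_map_keys labE hndk "", hkeysB]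
        exact List.map_congr_left (fun kk hkk => pvGetD_keys (by rw [hkeysB]; exact hkk) "")
      rw [hcollect, List.nil_append, hvals2, pvCount_congr V _ _ hSB]
    · simp only [pvStepA, pvStepB, if_neg hks, if_neg hk0]

-- ===== VERDICT (by name: the statement is the Claim_ definition above) =====
theorem compute_betti_numbers_py_spec : Claim_equal_compute_betti_numbers_py := by
  intro l hdom hpre
  unfold Spec_compute_betti_numbers_py
  unfold compute_betti_numbers_py compute_betti_numbers_py_alt
  by_cases hm : 0 ≤ pvMaxDim l
  · have hfacts : (pvDictOf l).getD 0 [] ≠ [] →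
        ∀ e ∈ (pvDictOf l).getD 1 [], e.length = 2 →
          ∀ x ∈ e, x ∈ ((pvDictOf l).getD 0 []).map pvHead :=
      fun hks => (hpre ⟨hm, hks⟩).2
    have hstep : pvStepA (pvDictOf l) = pvStepB (pvDictOf l) :=
      funext fun betti => funext fun k => pvStep_eq (pvDictOf l) hfacts betti k
    rw [hstep]
  · have hempty : PySem.List.pyRange 0 (pvMaxDim l + 1) 1 = [] := by
      rw [List.eq_nil_iff_forall_not_mem]
      intro x hx
      have h2 := (PySem.List.mem_pyRange_one).1 hx
      omega
    rw [hempty]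
    rfl
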